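-- pv_equiv track=rewrite | github.com/juandavidjd/extrac | core/odi_chat_api.py | split_follow_v25
-- ===== SOURCE A (Python) =====
-- def split_follow_v25(response_text: str) -> tuple:
--     """Separa respuesta principal de frase de seguimiento."""
--     if not response_text:
--         return response_text, None
--
--     sentences = response_text.split(". ")
--     if len(sentences) >= 2:
--         last = sentences[-1].strip()
--         if last.endswith("?") or any(w in last.lower() for w in ["enviame", "pasame", "dime", "cuentame"]):
--             main = ". ".join(sentences[:-1]) + "."
--             return main, last
--     return response_text, None
-- ===== SOURCE B (Python) =====
-- def split_follow_v25(response_text: str) -> tuple: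
--     """Separa respuesta principal de frase de seguimiento."""
--     if not response_text:
--         return response_text, None
--     idx = response_text.rfind(". ")
--     if idx == -1:
--         return response_text, None
--     last = response_text[idx + 2:].strip()
--     if last.endswith("?") or any(w in last.lower() for w in ["enviame", "pasame", "dime", "cuentame"]):
--         return response_text[:idx] + ".", last
--     return response_text, None
-- ===== Notes on version B (the rewrite author's own statement) =====
-- stated objective: simpler
-- what changed: Instead of splitting the text into a list of sentences and re-joining all but the last, B locates the last sentence separator with a single rfind and slices the string at that index, maintaining no list at all.
import Mathlib
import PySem

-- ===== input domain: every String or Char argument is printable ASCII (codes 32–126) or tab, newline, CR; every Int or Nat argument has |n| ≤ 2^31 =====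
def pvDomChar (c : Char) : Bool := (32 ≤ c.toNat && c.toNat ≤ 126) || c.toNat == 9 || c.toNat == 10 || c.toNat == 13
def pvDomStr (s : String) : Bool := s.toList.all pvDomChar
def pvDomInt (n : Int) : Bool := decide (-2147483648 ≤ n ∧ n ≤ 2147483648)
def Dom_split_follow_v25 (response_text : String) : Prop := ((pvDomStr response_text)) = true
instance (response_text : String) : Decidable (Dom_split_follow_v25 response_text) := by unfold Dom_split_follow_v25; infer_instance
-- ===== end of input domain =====

-- B replaces A's split-into-list / re-join by one rfind and two slices; objective: simpler (same return value; neither version has side effects).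

-- ===== PORT A =====
-- the literal keyword list ["enviame", "pasame", "dime", "cuentame"] both Pythons carry
def pvKeywords : List (List Char) :=
  [['e','n','v','i','a','m','e'], ['p','a','s','a','m','e'], ['d','i','m','e'], ['c','u','e','n','t','a','m','e']]

def split_follow_v25 (response_text : String) : Option String × Option String :=
  if response_text.toList = [] then (some response_text, none)
  else
    let sentences := PySem.Chars.splitOn response_text.toList ['.', ' ']
    if 2 ≤ sentences.length then
      let last := PySem.Chars.strip ((PySem.List.pyGet? sentences (-1)).getD [])
      if PySem.Chars.endswith last ['?'] ||
         pvKeywords.any (fun w => PySem.Chars.isIn w (PySem.Chars.lower last)) then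
        let main := PySem.Chars.join ['.', ' '] (PySem.List.slice sentences none (some (-1))) ++ ['.']
        (some (String.ofList main), some (String.ofList last))
      else (some response_text, none)
    else (some response_text, none)

-- ===== PORT B =====
def split_follow_v25_alt (response_text : String) : Option String × Option String :=
  if response_text.toList = [] then (some response_text, none)
  else
    let idx := PySem.Str.rfind response_text ". "
    if idx = -1 then (some response_text, none)
    else
      let last := PySem.Chars.strip (PySem.Chars.slice response_text.toList (some (idx + 2)) none)
      if PySem.Chars.endswith last ['?'] ||
         pvKeywords.any (fun w => PySem.Chars.isIn w (PySem.Chars.lower last)) then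
        (some (String.ofList (PySem.Chars.slice response_text.toList none (some idx) ++ ['.'])),
         some (String.ofList last))
      else (some response_text, none)

-- ===== PRECONDITION & SPEC =====
def Spec_split_follow_v25 (response_text : String) (out : Option String × Option String) : Prop := out = split_follow_v25_alt response_text
instance (response_text : String) (out : Option String × Option String) : Decidable (Spec_split_follow_v25 response_text out) := by unfold Spec_split_follow_v25; infer_instance

-- ===== CLAIM (what is proved, stated in full; the proofs are below) =====
def Claim_equal_split_follow_v25 : Prop := ∀ (response_text : String), Dom_split_follow_v25 response_text → Spec_split_follow_v25 response_text (split_follow_v25 response_text)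

-- ===== LEMMAS AND PROOFS =====

def pvModHead (f : List Char → List Char) : List (List Char) → List (List Char)
  | [] => []
  | p :: ps => f p :: ps

def pvSplit : List Char → List (List Char)
  | [] => [[]]
  | c :: rest =>
    if ['.', ' '].isPrefixOf (c :: rest) then
      [] :: pvSplit rest.tail
    else
      pvModHead (c :: ·) (pvSplit rest)
termination_by l => l.length
decreasing_by
  · simp [List.length_tail]
  · simp

theorem pvModHead_ne_nil (f : List Char → List Char) (x : List (List Char)) (h : x ≠ []) :
    pvModHead f x ≠ [] := by cases x with
  | nil => exact absurd rfl h
  | cons p ps => simp [pvModHead]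

theorem pvSplit_ne_nil (l : List Char) : pvSplit l ≠ [] := by
  induction l using pvSplit.induct with
  | case1 => simp [pvSplit]
  | case2 c rest h ih => rw [pvSplit]; simp [h]
  | case3 c rest h ih => rw [pvSplit]; simp [h]; exact pvModHead_ne_nil _ _ ih

theorem pvModHead_pvModHead (f g : List Char → List Char) (x : List (List Char)) :
    pvModHead f (pvModHead g x) = pvModHead (fun p => f (g p)) x := by
  cases x <;> simp [pvModHead]

theorem pvSplitOn_go_eq (fuel : Nat) : ∀ (l cur : List Char) (acc : List (List Char)), l.length < fuel →
    PySem.Chars.splitOn.go ['.', ' '] fuel l cur acc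
      = acc.reverse ++ pvModHead (fun p => cur.reverse ++ p) (pvSplit l) := by
  induction fuel with
  | zero => intro l cur acc h; omega
  | succ f ih =>
    intro l cur acc h
    cases l with
    | nil => simp [PySem.Chars.splitOn.go, pvSplit, pvModHead]
    | cons c rest =>
      by_cases hp : ['.', ' '].isPrefixOf (c :: rest) = true
      · rw [PySem.Chars.splitOn.go]
        simp only [hp, if_pos]
        have hdrop : List.drop ['.', ' '].length (c :: rest) = rest.tail := by
          cases rest <;> simp
        rw [hdrop, ih _ _ _ (by simp [List.length_tail] at h ⊢; omega)]
        rw [pvSplit]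
        simp only [hp, if_pos]
        cases pvSplit rest.tail <;> simp [pvModHead]
      · rw [PySem.Chars.splitOn.go]
        rw [if_neg hp]
        rw [ih _ _ _ (by simp at h ⊢; omega)]
        rw [pvSplit]
        rw [if_neg hp]
        rw [pvModHead_pvModHead]
        cases pvSplit rest <;> simp [pvModHead]

theorem pvSplitOn_eq (l : List Char) :
    PySem.Chars.splitOn l ['.', ' '] = pvSplit l := by
  rw [PySem.Chars.splitOn, pvSplitOn_go_eq _ _ _ _ (by omega)]
  cases pvSplit l <;> simp [pvModHead]

theorem pvJoin_pvSplit (l : List Char) :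
    PySem.Chars.join ['.', ' '] (pvSplit l) = l := by
  induction l using pvSplit.induct with
  | case1 => simp [pvSplit, PySem.Chars.join, List.intercalate]
  | case2 c rest hp ih =>
    rw [pvSplit, if_pos hp]
    obtain ⟨t, ht⟩ := (List.isPrefixOf_iff_prefix.mp hp)
    obtain ⟨rfl, rfl⟩ : c = '.' ∧ rest = ' ' :: t := by
      simpa using ht.symm
    simp only [List.tail_cons] at ih ⊢
    cases hps : pvSplit t with
    | nil => exact absurd hps (pvSplit_ne_nil t)
    | cons p ps =>
      rw [hps] at ih
      rw [PySem.Chars.join_cons_cons, ih]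
      rfl
  | case3 c rest hp ih =>
    rw [pvSplit, if_neg hp]
    cases hps : pvSplit rest with
    | nil => exact absurd hps (pvSplit_ne_nil rest)
    | cons p ps =>
      rw [hps] at ih
      cases ps with
      | nil => simp [pvModHead, PySem.Chars.join_singleton] at ih ⊢; simp [ih]
      | cons q qs =>
        simp only [pvModHead]
        rw [PySem.Chars.join_cons_cons] at ih ⊢
        rw [← ih]
        rfl

def pvOcc (l : List Char) (k : Nat) : Prop := ['.', ' '].isPrefixOf (l.drop k) = true

theorem pvOcc_shift (c : Char) (rest : List Char) (i : Nat) :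
    pvOcc (c :: rest) (i + 1) ↔ pvOcc rest i := by
  simp [pvOcc]

theorem pvOcc_overlap (l : List Char) (k : Nat) (h0 : pvOcc l k) (h1 : pvOcc l (k + 1)) : False := by
  obtain ⟨t, ht⟩ := List.isPrefixOf_iff_prefix.mp h0
  have hd : l.drop (k + 1) = ' ' :: t := by
    rw [← List.tail_drop, ← ht]; rfl
  have := List.isPrefixOf_iff_prefix.mp h1
  rw [hd] at this
  obtain ⟨u, hu⟩ := this
  simp at hu

theorem pvModHead_append (f : List Char → List Char) (xs ys : List (List Char)) (h : xs ≠ []) :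
    pvModHead f (xs ++ ys) = pvModHead f xs ++ ys := by
  cases xs with
  | nil => exact absurd rfl h
  | cons p ps => simp [pvModHead]

theorem pvSplit_no_occ (l : List Char) (h : ∀ i, ¬ pvOcc l i) : pvSplit l = [l] := by
  induction l using pvSplit.induct with
  | case1 => rw [pvSplit]
  | case2 c rest hp ih => exact absurd hp (h 0)
  | case3 c rest hp ih =>
    rw [pvSplit, if_neg hp, ih (fun i => (pvOcc_shift c rest i).not.mp (h (i + 1)))]
    rfl

theorem pvSplit_last_occ (l : List Char) : ∀ (k : Nat), pvOcc l k →
    (∀ i, k < i → ¬ pvOcc l i) →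
    pvSplit l = pvSplit (l.take k) ++ [l.drop (k + 2)] := by
  induction l using pvSplit.induct with
  | case1 => intro k hk _; simp [pvOcc] at hk
  | case2 c rest hp ih =>
    intro k hk hmax
    obtain ⟨t, ht⟩ := List.isPrefixOf_iff_prefix.mp hp
    obtain ⟨rfl, rfl⟩ : c = '.' ∧ rest = ' ' :: t := by simpa using ht.symm
    simp only [List.tail_cons] at ih
    match k, hk with
    | 0, _ =>
      have hno : ∀ i, ¬ pvOcc t i := by
        intro i hi
        exact hmax (i + 2) (by omega) (by simpa [pvOcc] using hi)
      rw [pvSplit, if_pos hp]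
      simp only [List.tail_cons]
      rw [pvSplit_no_occ t hno, List.take_zero, pvSplit]
      rfl
    | 1, h1 => exact absurd h1 (fun h1 => pvOcc_overlap _ 0 hp h1)
    | (m + 2), hk =>
      have hocc : pvOcc t m := by simpa [pvOcc] using hk
      have hmax' : ∀ i, m < i → ¬ pvOcc t i := by
        intro i hi hoi
        exact hmax (i + 2) (by omega) (by simpa [pvOcc] using hoi)
      have hih := ih m hocc hmax'
      rw [pvSplit, if_pos hp]
      simp only [List.tail_cons, hih]
      have htake : ('.' :: ' ' :: t).take (m + 2) = '.' :: ' ' :: t.take m := by simp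
      rw [htake, pvSplit, if_pos (by simp [List.isPrefixOf])]
      rfl
  | case3 c rest hp ih =>
    intro k hk hmax
    match k, hk with
    | 0, hk => exact absurd hk hp
    | (m + 1), hk =>
      have hocc : pvOcc rest m := (pvOcc_shift c rest m).mp hk
      have hmax' : ∀ i, m < i → ¬ pvOcc rest i := by
        intro i hi hoi
        exact hmax (i + 1) (by omega) ((pvOcc_shift c rest i).mpr hoi)
      have hih := ih m hocc hmax'
      rw [pvSplit, if_neg hp, hih, pvModHead_append _ _ _ (pvSplit_ne_nil _)]
      have hnp : ¬ (['.', ' '].isPrefixOf (c :: rest.take m) = true) := by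
        intro hpp
        apply hp
        apply List.isPrefixOf_iff_prefix.mpr
        have h1 := List.isPrefixOf_iff_prefix.mp hpp
        have h2 : (c :: rest.take m) <+: (c :: rest) := ⟨rest.drop m, by simp⟩
        exact h1.trans h2
      have : (c :: rest).take (m + 1) = c :: rest.take m := by simp
      rw [this, pvSplit, if_neg hnp]
      rfl

theorem pvRfind_go_cases (s sub : List Char) (j : Nat) :
    (PySem.Chars.rfind.go s sub j = -1 ∧ ∀ i : Nat, i ≤ j → ¬ (sub.isPrefixOf (s.drop i) = true)) ∨
    (∃ k : Nat, PySem.Chars.rfind.go s sub j = (k : Int) ∧ k ≤ j ∧ sub.isPrefixOf (s.drop k) = true ∧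
      ∀ i : Nat, k < i → i ≤ j → ¬ (sub.isPrefixOf (s.drop i) = true)) := by
  induction j with
  | zero =>
    by_cases hp : sub.isPrefixOf s = true
    · right
      refine ⟨0, ?_, le_refl 0, by simpa using hp, fun i hi hij => by omega⟩
      simp [PySem.Chars.rfind.go, hp]
    · left
      constructor
      · simp [PySem.Chars.rfind.go, hp]
      · intro i hi
        interval_cases i
        simpa using hp
  | succ j ih =>
    by_cases hp : sub.isPrefixOf (s.drop (j + 1)) = true
    · right
      refine ⟨j + 1, ?_, le_refl _, hp, fun i hi hij => by omega⟩
      rw [PySem.Chars.rfind.go]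
      simp [hp]
    · have hgo : PySem.Chars.rfind.go s sub (j + 1) = PySem.Chars.rfind.go s sub j := by
        rw [PySem.Chars.rfind.go]
        simp [hp]
      rcases ih with ⟨h1, h2⟩ | ⟨k, h1, h2, h3, h4⟩
      · left
        refine ⟨hgo.trans h1, fun i hi => ?_⟩
        rcases Nat.lt_or_ge i (j + 1) with h | h
        · exact h2 i (by omega)
        · have : i = j + 1 := by omega
          subst this; exact hp
      · right
        refine ⟨k, hgo.trans h1, by omega, h3, fun i hi hij => ?_⟩
        rcases Nat.lt_or_ge i (j + 1) with h | h
        · exact h4 i hi (by omega)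
        · have : i = j + 1 := by omega
          subst this; exact hp

theorem pvRfind_eq_go (s : String) :
    PySem.Chars.rfind s.toList ['.', ' '] = PySem.Chars.rfind.go s.toList ['.', ' '] s.toList.length := rfl

theorem pvPorts_eq (s : String) : split_follow_v25 s = split_follow_v25_alt s := by
  by_cases hnil : s.toList = []
  · simp [split_follow_v25, split_follow_v25_alt, hnil]
  · rcases pvRfind_go_cases s.toList ['.', ' '] s.toList.length with ⟨h1, h2⟩ | ⟨k, h1, hk, hpref, hmax⟩
    · -- no ". " anywhere: both fall through
      have hno : ∀ i, ¬ pvOcc s.toList i := by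
        intro i hi
        by_cases hle : i ≤ s.toList.length
        · exact h2 i hle hi
        · rw [pvOcc, List.drop_eq_nil_of_le (by omega)] at hi
          simp [List.isPrefixOf] at hi
      have hs : PySem.Chars.splitOn s.toList ['.', ' '] = [s.toList] := by
        rw [pvSplitOn_eq, pvSplit_no_occ _ hno]
      have hb : PySem.Chars.rfind s.toList ['.', ' '] = -1 := by rw [pvRfind_eq_go, h1]
      simp [split_follow_v25, split_follow_v25_alt, hnil, hs, hb]
    · -- last occurrence at k
      have hmax' : ∀ i, k < i → ¬ pvOcc s.toList i := by
        intro i hi hoi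
        by_cases hle : i ≤ s.toList.length
        · exact hmax i hi hle hoi
        · rw [pvOcc, List.drop_eq_nil_of_le (by omega)] at hoi
          simp [List.isPrefixOf] at hoi
      have hsplit := pvSplit_last_occ s.toList k hpref hmax'
      have hk2 : k + 2 ≤ s.toList.length := by
        have hle := (List.isPrefixOf_iff_prefix.mp hpref).length_le
        rw [List.length_drop] at hle
        simp only [List.length_cons, List.length_nil] at hle
        omega
      have hs : PySem.Chars.splitOn s.toList ['.', ' ']
          = pvSplit (s.toList.take k) ++ [s.toList.drop (k + 2)] := by
        rw [pvSplitOn_eq, hsplit]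
      have hb : PySem.Chars.rfind s.toList ['.', ' '] = (k : Int) := by rw [pvRfind_eq_go, h1]
      have hbne : ((k : Int) = -1) = False := by simp
      have hlen : 2 ≤ (pvSplit (s.toList.take k) ++ [s.toList.drop (k + 2)]).length := by
        have := pvSplit_ne_nil (s.toList.take k)
        have := List.length_pos_iff.mpr this
        simp
        omega
      have hlastA : (PySem.List.pyGet? (pvSplit (s.toList.take k) ++ [s.toList.drop (k + 2)]) (-1)).getD []
          = s.toList.drop (k + 2) := by
        simp [PySem.List.pyGet?, PySem.List.pyIdx?]
      have hlastB : PySem.Chars.slice s.toList (some ((k : Int) + 2)) none = s.toList.drop (k + 2) := by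
        rw [PySem.Chars.slice_eq_listSlice]
        have h1 : ¬ (((k : Int) + 2) < 0) := by omega
        have h2 : ((k : Int) + 2).toNat = k + 2 := by omega
        simp only [PySem.List.slice, PySem.List.clampIdx, if_neg h1, h2, min_eq_left hk2]
        exact List.take_of_length_le (by simp)
      have hfrontA : PySem.List.slice (pvSplit (s.toList.take k) ++ [s.toList.drop (k + 2)]) none (some (-1))
          = pvSplit (s.toList.take k) := by
        simp [PySem.List.slice, PySem.List.clampIdx]
      have hjoin : PySem.Chars.join ['.', ' '] (pvSplit (s.toList.take k)) = s.toList.take k :=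
        pvJoin_pvSplit _
      have hmainB : PySem.Chars.slice s.toList none (some (k : Int)) = s.toList.take k := by
        rw [PySem.Chars.slice_eq_listSlice]
        have h1 : ¬ ((k : Int) < 0) := by omega
        have h2 : ((k : Int)).toNat = k := by omega
        have hkle : k ≤ s.toList.length := by omega
        simp only [PySem.List.slice, PySem.List.clampIdx, if_neg h1, h2,
          min_eq_left hkle, Nat.sub_zero, List.drop_zero]
      have hdots : (". ".toList) = ['.', ' '] := rfl
      simp only [split_follow_v25, split_follow_v25_alt, if_neg hnil, PySem.Str.rfind_eq, hdots,
        hs, hb, hbne, if_false, hlastA, hlastB, hfrontA, hjoin, hmainB, if_pos hlen]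

-- ===== VERDICT (by name: the statement is the Claim_ definition above) =====
theorem split_follow_v25_spec : Claim_equal_split_follow_v25 := by
  intro response_text _
  unfold Spec_split_follow_v25
  exact pvPorts_eq response_text
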